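-- pv_equiv track=rewrite | github.com/bnadimi/AutoFlows | datamineresearch/gem5_traces/gem5-snoop/localPatterns_ratios.py | remove_binary_pattern
-- ===== SOURCE A (Python) =====
-- def remove_binary_pattern(pair, trace):
--     # Find all occurrences of the binary pattern and mark them
--     marked_trace = [-1] * len(trace)
--     for i in range(len(trace)):
--         if trace[i] == pair[0]:
--             marked_trace[i] = 1
--         elif trace[i] == pair[1]:
--             marked_trace[i] = 2
--
--     # Remove pairs from the trace
--     new_trace = []
--     i = 0
--     pair = -1
--     toremove = set()
--     firsthalf = []
--
--
--     while i < len(trace):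
--         #add index for first part of potential pair
--         if marked_trace[i] == 1:
--             firsthalf.append(i)
--             i+=1
--             continue
--         if marked_trace[i] == 2 and len(firsthalf)!=0:
--             #if the index is before this
--             if(firsthalf[0] < i):
--                 remove = firsthalf.pop(0) #pop and track the index
--                 toremove.add(remove) #the index of the first part of the pair
--                 toremove.add(i) #the index of the second part of the pair
--         i+=1
--
--
--
--     new_trace = [trace[i] for i in range(len(trace)) if i not in toremove]
--     return new_trace
-- ===== SOURCE B (Python) =====
-- def remove_binary_pattern(pair, trace):
--     # One counting pass replaces A's FIFO index queue: `available` counts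
--     # pending pair[0]s, `m` counts matches, drop flags mark matched seconds.
--     available = 0
--     m = 0
--     drop = [False] * len(trace)
--     for i in range(len(trace)):
--         x = trace[i]
--         if x == pair[0]:
--             available += 1
--         elif x == pair[1]:
--             if available > 0:
--                 available -= 1
--                 m += 1
--                 drop[i] = True
--     # Rebuild, skipping the first m occurrences of pair[0] and flagged seconds.
--     out = []
--     skipped = 0
--     for i in range(len(trace)):
--         x = trace[i]
--         if x == pair[0] and skipped < m:
--             skipped += 1
--         elif not drop[i]:
--             out.append(x)
--     return out
-- ===== Notes on version B (the rewrite author's own statement) =====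
-- stated objective: alternative
-- what changed: Replaces A's FIFO queue of unmatched first-element indices plus an index removal set with a single counting pass (pending-firsts counter, match count m, per-position drop flags) and a rebuild pass that skips the first m occurrences of pair[0] and the flagged seconds.
import Mathlib
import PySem

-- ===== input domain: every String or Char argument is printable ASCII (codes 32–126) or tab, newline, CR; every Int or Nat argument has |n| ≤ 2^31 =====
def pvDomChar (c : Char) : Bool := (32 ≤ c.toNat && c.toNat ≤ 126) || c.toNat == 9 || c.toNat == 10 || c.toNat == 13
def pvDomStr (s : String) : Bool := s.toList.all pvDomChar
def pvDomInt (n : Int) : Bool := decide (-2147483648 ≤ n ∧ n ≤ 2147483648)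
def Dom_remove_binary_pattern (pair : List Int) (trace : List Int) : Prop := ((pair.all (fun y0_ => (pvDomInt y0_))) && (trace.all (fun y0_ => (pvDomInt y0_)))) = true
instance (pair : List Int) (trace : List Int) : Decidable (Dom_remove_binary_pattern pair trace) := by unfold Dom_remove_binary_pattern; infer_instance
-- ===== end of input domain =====

-- B replaces A's FIFO index queue + removal set by one counting pass (pending-firsts counter,
-- match count, per-position flags) and a rebuild pass; alternative decomposition, same values.

-- ===== PORT A =====
def remove_binary_pattern (pair : List Int) (trace : List Int) : List Int :=
  let p0 := (PySem.List.pyGet? pair 0).getD 0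
  let p1 := (PySem.List.pyGet? pair 1).getD 0
  -- marked_trace[i] = 1 / 2 / -1
  let marked := trace.map (fun x => if x = p0 then (1 : Int) else if x = p1 then 2 else -1)
  -- while loop: firsthalf queue + toremove set
  let st := (PySem.List.pyRange 0 (PySem.List.len trace) 1).foldl
    (fun (st : List Int × PySem.Set Int) i =>
      if PySem.List.pyGetD marked i 0 = 1 then (st.1 ++ [i], st.2)
      else if PySem.List.pyGetD marked i 0 = 2 ∧ st.1 ≠ [] then
        (if st.1.headD 0 < i then (st.1.tail, PySem.Set.add (PySem.Set.add st.2 (st.1.headD 0)) i)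
         else st)
      else st)
    ([], PySem.Set.empty)
  -- new_trace = [trace[i] for i in range(len(trace)) if i not in toremove]
  (PySem.List.pyRange 0 (PySem.List.len trace) 1).foldl
    (fun acc i => if PySem.Set.contains st.2 i then acc else acc ++ [PySem.List.pyGetD trace i 0]) []

-- ===== PORT B =====
def remove_binary_pattern_alt (pair : List Int) (trace : List Int) : List Int :=
  let p0 := (PySem.List.pyGet? pair 0).getD 0
  let p1 := (PySem.List.pyGet? pair 1).getD 0
  -- first pass: available counter, match count m, drop flags
  let fp := (PySem.List.pyRange 0 (PySem.List.len trace) 1).foldl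
    (fun (st : Int × Int × List Bool) i =>
      if PySem.List.pyGetD trace i 0 = p0 then (st.1 + 1, st.2.1, st.2.2)
      else if PySem.List.pyGetD trace i 0 = p1 then
        (if st.1 > 0 then (st.1 - 1, st.2.1 + 1, PySem.List.pySetD st.2.2 i true) else st)
      else st)
    (0, 0, List.replicate trace.length false)
  let m := fp.2.1
  let drop := fp.2.2
  -- second pass: rebuild, skipping first m occurrences of pair[0] and flagged seconds
  let out := (PySem.List.pyRange 0 (PySem.List.len trace) 1).foldl
    (fun (st : Int × List Int) i =>
      if PySem.List.pyGetD trace i 0 = p0 ∧ st.1 < m then (st.1 + 1, st.2)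
      else if PySem.List.pyGetD drop i false then st
      else (st.1, st.2 ++ [PySem.List.pyGetD trace i 0]))
    (0, [])
  out.2

-- ===== PRECONDITION & SPEC =====
-- Pre_ excludes exactly the inputs on which Python A raises IndexError reading pair[0]/pair[1]
-- (pair shorter than the accesses the trace forces); A returns on everything admitted.
def Pre_remove_binary_pattern (pair : List Int) (trace : List Int) : Prop :=
  trace = [] ∨ 2 ≤ pair.length ∨ (1 ≤ pair.length ∧ ∀ x ∈ trace, x = pair.headD 0)
instance (pair : List Int) (trace : List Int) : Decidable (Pre_remove_binary_pattern pair trace) := by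
  unfold Pre_remove_binary_pattern; infer_instance
def pvWitness_remove_binary_pattern : List Int × List Int := ([1, 2], [1, 3, 2, 2, 1, 2])

def Spec_remove_binary_pattern (pair : List Int) (trace : List Int) (out : List Int) : Prop := out = remove_binary_pattern_alt pair trace
instance (pair : List Int) (trace : List Int) (out : List Int) : Decidable (Spec_remove_binary_pattern pair trace out) := by unfold Spec_remove_binary_pattern; infer_instance

-- ===== CLAIM (what is proved, stated in full; the proofs are below) =====
def Claim_equal_remove_binary_pattern : Prop := ∀ (pair : List Int) (trace : List Int), Dom_remove_binary_pattern pair trace → Pre_remove_binary_pattern pair trace → Spec_remove_binary_pattern pair trace (remove_binary_pattern pair trace)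

-- ===== LEMMAS AND PROOFS =====

def fpos (p0 : Int) (k : Int) : List Int → List Int
  | [] => []
  | x :: t => if x = p0 then k :: fpos p0 (k + 1) t else fpos p0 (k + 1) t

def spos (p0 p1 : Int) (a : Int) (k : Int) : List Int → List Int
  | [] => []
  | x :: t =>
    if x = p0 then spos p0 p1 (a + 1) (k + 1) t
    else if x = p1 then
      (if a > 0 then k :: spos p0 p1 (a - 1) (k + 1) t else spos p0 p1 a (k + 1) t)
    else spos p0 p1 a (k + 1) t

lemma mem_fpos_lb (p0 : Int) : ∀ (t : List Int) (k j : Int), j ∈ fpos p0 k t → k ≤ j := by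
  intro t
  induction t with
  | nil => intro k j h; simp [fpos] at h
  | cons x t ih =>
    intro k j h
    simp only [fpos] at h
    split_ifs at h with h1
    · rcases List.mem_cons.1 h with h | h
      · omega
      · have := ih (k + 1) j h; omega
    · have := ih (k + 1) j h; omega

lemma mem_spos_lb (p0 p1 : Int) : ∀ (t : List Int) (a k j : Int), j ∈ spos p0 p1 a k t → k ≤ j := by
  intro t
  induction t with
  | nil => intro a k j h; simp [spos] at h
  | cons x t ih =>
    intro a k j h
    simp only [spos] at h
    split_ifs at h with h1 h2 h3
    · have := ih (a + 1) (k + 1) j h; omega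
    · rcases List.mem_cons.1 h with h | h
      · omega
      · have := ih (a - 1) (k + 1) j h; omega
    · have := ih a (k + 1) j h; omega
    · have := ih a (k + 1) j h; omega

def stepA (p0 p1 : Int) (st : List Int × PySem.Set Int) (px : Int × Int) : List Int × PySem.Set Int :=
  if px.2 = p0 then (st.1 ++ [px.1], st.2)
  else if px.2 = p1 ∧ st.1 ≠ [] then
    (if st.1.headD 0 < px.1 then (st.1.tail, PySem.Set.add (PySem.Set.add st.2 (st.1.headD 0)) px.1) else st)
  else st

lemma loopA (p0 p1 : Int) : ∀ (t : List Int) (k : Int) (fh : List Int) (tr : PySem.Set Int),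
    (∀ j ∈ fh, j < k) →
    ((PySem.List.enumerate t k).foldl (stepA p0 p1) (fh, tr)).1
        = (fh ++ fpos p0 k t).drop (spos p0 p1 fh.length k t).length
    ∧ ∀ j : Int, (j ∈ ((PySem.List.enumerate t k).foldl (stepA p0 p1) (fh, tr)).2 ↔
        (j ∈ tr ∨ j ∈ (fh ++ fpos p0 k t).take (spos p0 p1 fh.length k t).length ∨ j ∈ spos p0 p1 fh.length k t)) := by
  intro t
  induction t with
  | nil => intro k fh tr h; simp [PySem.List.enumerate, fpos, spos]
  | cons x t ih =>
    intro k fh tr hfh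
    rw [PySem.List.enumerate_cons]
    simp only [List.foldl_cons]
    by_cases h0 : x = p0
    · have hstep : stepA p0 p1 (fh, tr) (k, x) = (fh ++ [k], tr) := by simp [stepA, h0]
      rw [hstep]
      have hfh' : ∀ j ∈ fh ++ [k], j < k + 1 := by
        intro j hj; rcases List.mem_append.1 hj with hj | hj
        · have := hfh j hj; omega
        · simp at hj; omega
      obtain ⟨ih1, ih2⟩ := ih (k + 1) (fh ++ [k]) tr hfh'
      have hcast : ((fh ++ [k]).length : Int) = (fh.length : Int) + 1 := by simp
      rw [hcast] at ih1 ih2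
      simp only [fpos, spos, h0, List.append_assoc, List.singleton_append] at *
      exact ⟨ih1, ih2⟩
    · by_cases h1 : x = p1
      · match fh with
        | [] =>
          have hstep : stepA p0 p1 (([] : List Int), tr) (k, x) = ([], tr) := by
            simp only [stepA]
            rw [if_neg h0]
            simp
          rw [hstep]
          obtain ⟨ih1, ih2⟩ := ih (k + 1) [] tr (by simp)
          have e1 : fpos p0 k (x :: t) = fpos p0 (k + 1) t := by simp [fpos, h0]
          have e2 : spos p0 p1 (([] : List Int).length : Int) k (x :: t)
              = spos p0 p1 (([] : List Int).length : Int) (k + 1) t := by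
            simp only [spos, if_neg h0, if_pos h1]
            rw [if_neg (by simp)]
          rw [e1, e2]
          exact ⟨ih1, ih2⟩
        | h :: ft =>
          have hlt : h < k := hfh h (by simp)
          have hstep : stepA p0 p1 ((h :: ft), tr) (k, x)
              = (ft, PySem.Set.add (PySem.Set.add tr h) k) := by
            simp only [stepA]
            rw [if_neg h0, if_pos (by exact ⟨h1, by simp⟩ : x = p1 ∧ (h :: ft) ≠ [])]
            simp [hlt]
          rw [hstep]
          have hft : ∀ j ∈ ft, j < k + 1 := by intro j hj; have := hfh j (by simp [hj]); omega
          obtain ⟨ih1, ih2⟩ := ih (k + 1) ft (PySem.Set.add (PySem.Set.add tr h) k) hft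
          have e1 : fpos p0 k (x :: t) = fpos p0 (k + 1) t := by simp [fpos, h0]
          have e2 : spos p0 p1 (((h :: ft).length : Nat) : Int) k (x :: t)
              = k :: spos p0 p1 ((ft.length : Nat) : Int) (k + 1) t := by
            have ha : (((h :: ft).length : Nat) : Int) - 1 = ((ft.length : Nat) : Int) := by
              simp only [List.length_cons]; push_cast; omega
            simp only [spos]
            rw [if_neg h0, if_pos h1, if_pos (by simp only [List.length_cons]; push_cast; omega), ha]
          rw [e1, e2]
          constructor
          · rw [ih1]
            simp [List.drop_succ_cons]
          · intro j
            rw [ih2 j]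
            simp only [PySem.Set.mem_add, List.length_cons, List.take_succ_cons,
              List.cons_append, List.mem_cons]
            tauto
      · have hstep : stepA p0 p1 (fh, tr) (k, x) = (fh, tr) := by simp [stepA, h0, h1]
        rw [hstep]
        have hfh' : ∀ j ∈ fh, j < k + 1 := by intro j hj; have := hfh j hj; omega
        obtain ⟨ih1, ih2⟩ := ih (k + 1) fh tr hfh'
        simp only [fpos, spos, h0, h1] at *
        exact ⟨ih1, ih2⟩

lemma pyGetD_pySetD_lt {α : Type} (xs : List α) (k j : Int) (v d : α) (hk0 : 0 ≤ k)
    (hk : k < (xs.length : Int)) (hj : 0 ≤ j) :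
    PySem.List.pyGetD (PySem.List.pySetD xs k v) j d = if j = k then v else PySem.List.pyGetD xs j d := by
  rw [PySem.List.pySetD_of_nonneg _ _ hk0, PySem.List.pyGetD_of_nonneg _ _ hj,
    PySem.List.pyGetD_of_nonneg _ _ hj]
  rcases eq_or_ne j k with h | h
  · subst h
    rw [if_pos rfl]
    have : j.toNat < xs.length := by omega
    simp [List.getD_eq_getElem?_getD, this]
  · rw [if_neg h]
    have : j.toNat ≠ k.toNat := by omega
    simp [List.getD_eq_getElem?_getD, Ne.symm this]

def stepB1 (p0 p1 : Int) (st : Int × Int × List Bool) (px : Int × Int) : Int × Int × List Bool :=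
  if px.2 = p0 then (st.1 + 1, st.2.1, st.2.2)
  else if px.2 = p1 then
    (if st.1 > 0 then (st.1 - 1, st.2.1 + 1, PySem.List.pySetD st.2.2 px.1 true) else st)
  else st

lemma loopB1 (p0 p1 : Int) : ∀ (t : List Int) (k : Int) (a m : Int) (drop : List Bool),
    0 ≤ k → (drop.length : Int) = k + t.length →
    ((PySem.List.enumerate t k).foldl (stepB1 p0 p1) (a, m, drop)).2.1
        = m + (spos p0 p1 a k t).length
    ∧ ∀ j : Int, 0 ≤ j →
        PySem.List.pyGetD ((PySem.List.enumerate t k).foldl (stepB1 p0 p1) (a, m, drop)).2.2 j false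
          = (PySem.List.pyGetD drop j false || decide (j ∈ spos p0 p1 a k t)) := by
  intro t
  induction t with
  | nil => intro k a m drop hk hlen; simp [PySem.List.enumerate, spos]
  | cons x t ih =>
    intro k a m drop hk hlen
    rw [PySem.List.enumerate_cons]
    simp only [List.foldl_cons]
    by_cases h0 : x = p0
    · have hstep : stepB1 p0 p1 (a, m, drop) (k, x) = (a + 1, m, drop) := by simp [stepB1, h0]
      rw [hstep]
      have e2 : spos p0 p1 a k (x :: t) = spos p0 p1 (a + 1) (k + 1) t := by
        simp [spos, h0]
      obtain ⟨ih1, ih2⟩ := ih (k + 1) (a + 1) m drop (by omega) (by simp at hlen ⊢; omega)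
      rw [e2]
      exact ⟨ih1, ih2⟩
    · by_cases h1 : x = p1
      · by_cases ha : a > 0
        · have hstep : stepB1 p0 p1 (a, m, drop) (k, x)
              = (a - 1, m + 1, PySem.List.pySetD drop k true) := by
            simp only [stepB1]
            rw [if_neg h0, if_pos h1, if_pos ha]
          rw [hstep]
          have e2 : spos p0 p1 a k (x :: t) = k :: spos p0 p1 (a - 1) (k + 1) t := by
            simp only [spos]
            rw [if_neg h0, if_pos h1, if_pos ha]
          obtain ⟨ih1, ih2⟩ := ih (k + 1) (a - 1) (m + 1) (PySem.List.pySetD drop k true)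
            (by omega) (by simp [PySem.List.length_pySetD] at hlen ⊢; omega)
          rw [e2]
          constructor
          · rw [ih1]; simp; ring
          · intro j hj
            rw [ih2 j hj]
            rw [pyGetD_pySetD_lt drop k j true false hk (by simp at hlen ⊢; omega) hj]
            rcases eq_or_ne j k with hjk | hjk
            · subst hjk
              have : j ∉ spos p0 p1 (a - 1) (j + 1) t := fun hm => by
                have := mem_spos_lb p0 p1 t (a - 1) (j + 1) j hm; omega
              simp [this]
            · simp [hjk]
        · have hstep : stepB1 p0 p1 (a, m, drop) (k, x) = (a, m, drop) := by
            simp only [stepB1]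
            rw [if_neg h0, if_pos h1, if_neg ha]
          rw [hstep]
          have e2 : spos p0 p1 a k (x :: t) = spos p0 p1 a (k + 1) t := by
            simp only [spos]
            rw [if_neg h0, if_pos h1, if_neg ha]
          obtain ⟨ih1, ih2⟩ := ih (k + 1) a m drop (by omega) (by simp at hlen ⊢; omega)
          rw [e2]
          exact ⟨ih1, ih2⟩
      · have hstep : stepB1 p0 p1 (a, m, drop) (k, x) = (a, m, drop) := by
          simp only [stepB1]
          rw [if_neg h0, if_neg h1]
        rw [hstep]
        have e2 : spos p0 p1 a k (x :: t) = spos p0 p1 a (k + 1) t := by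
          simp only [spos]
          rw [if_neg h0, if_neg h1]
        obtain ⟨ih1, ih2⟩ := ih (k + 1) a m drop (by omega) (by simp at hlen ⊢; omega)
        rw [e2]
        exact ⟨ih1, ih2⟩

def stepB2 (p0 mI : Int) (drop : List Bool) (st : Int × List Int) (px : Int × Int) : Int × List Int :=
  if px.2 = p0 ∧ st.1 < mI then (st.1 + 1, st.2)
  else if PySem.List.pyGetD drop px.1 false then st
  else (st.1, st.2 ++ [px.2])

lemma outEq (p0 p1 : Int) (m : Nat) (tr : PySem.Set Int) (drop : List Bool) :
    ∀ (t : List Int) (k a : Int) (r : Nat) (c : Int) (acc : List Int),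
    c = min (m : Int) (r : Int) →
    (∀ j, k ≤ j → (j ∈ tr ↔ j ∈ (fpos p0 k t).take (m - r) ∨ j ∈ spos p0 p1 a k t)) →
    (∀ j, k ≤ j → PySem.List.pyGetD drop j false = decide (j ∈ spos p0 p1 a k t)) →
    (PySem.List.enumerate t k).foldl
        (fun acc (px : Int × Int) => if PySem.Set.contains tr px.1 then acc else acc ++ [px.2]) acc
      = ((PySem.List.enumerate t k).foldl (stepB2 p0 (m : Int) drop) (c, acc)).2 := by
  intro t
  induction t with
  | nil => intro k a r c acc hc htr hdrop; simp [PySem.List.enumerate]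
  | cons x t ih =>
    intro k a r c acc hc htr hdrop
    rw [PySem.List.enumerate_cons]
    simp only [List.foldl_cons]
    by_cases h0 : x = p0
    · have e2 : spos p0 p1 a k (x :: t) = spos p0 p1 (a + 1) (k + 1) t := by simp [spos, h0]
      have hks : k ∉ spos p0 p1 (a + 1) (k + 1) t := fun hm => by
        have := mem_spos_lb p0 p1 t (a + 1) (k + 1) k hm; omega
      by_cases hrm : r < m
      · -- k is among the first m firsts: both remove it
        have hktr : k ∈ tr := by
          rw [htr k le_rfl, e2]
          refine Or.inl ?_
          simp only [fpos, if_pos h0]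
          rw [show m - r = (m - (r + 1)) + 1 by omega, List.take_succ_cons]
          exact List.mem_cons_self
        have hcon : PySem.Set.contains tr k = true := by
          simpa using (PySem.Set.contains_iff tr k).2 hktr
        rw [hcon]
        simp only [if_true]
        have hstep : stepB2 p0 (m : Int) drop (c, acc) (k, x) = (c + 1, acc) := by
          simp only [stepB2]
          rw [if_pos ⟨h0, by omega⟩]
        rw [hstep]
        apply ih (k + 1) (a + 1) (r + 1) (c + 1) acc (by push_cast; omega)
        · intro j hj
          rw [htr j (by omega), e2]
          simp only [fpos, if_pos h0]
          rw [show m - r = (m - (r + 1)) + 1 by omega, List.take_succ_cons]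
          have hne : j ≠ k := by omega
          simp [hne]
        · intro j hj
          rw [hdrop j (by omega), e2]
      · -- quota exhausted: both keep k
        have hktr : k ∉ tr := by
          rw [htr k le_rfl, e2]
          rintro (hm | hm)
          · rw [show m - r = 0 by omega] at hm; simp at hm
          · exact hks hm
        have hcon : PySem.Set.contains tr k = false := by
          rw [← Bool.not_eq_true, PySem.Set.contains_iff]
          exact hktr
        rw [hcon]
        simp only [Bool.false_eq_true, if_false]
        have hstep : stepB2 p0 (m : Int) drop (c, acc) (k, x) = (c, acc ++ [x]) := by
          simp only [stepB2]
          rw [if_neg (by rintro ⟨-, hlt⟩; omega)]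
          rw [hdrop k le_rfl, e2]
          simp [hks]
        rw [hstep]
        apply ih (k + 1) (a + 1) (r + 1) c (acc ++ [x]) (by push_cast; omega)
        · intro j hj
          rw [htr j (by omega), e2]
          simp only [fpos, if_pos h0]
          rw [show m - r = 0 by omega, show m - (r + 1) = 0 by omega]
          simp
        · intro j hj
          rw [hdrop j (by omega), e2]
    · have e1 : fpos p0 k (x :: t) = fpos p0 (k + 1) t := by simp [fpos, h0]
      have hkf : k ∉ (fpos p0 (k + 1) t).take (m - r) := fun hm => by
        have := mem_fpos_lb p0 t (k + 1) k (List.take_subset _ _ hm); omega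
      by_cases h1 : x = p1
      · by_cases ha : a > 0
        · have e2 : spos p0 p1 a k (x :: t) = k :: spos p0 p1 (a - 1) (k + 1) t := by
            simp only [spos]; rw [if_neg h0, if_pos h1, if_pos ha]
          have hks' : k ∉ spos p0 p1 (a - 1) (k + 1) t := fun hm => by
            have := mem_spos_lb p0 p1 t (a - 1) (k + 1) k hm; omega
          have hktr : k ∈ tr := by
            rw [htr k le_rfl, e2]
            exact Or.inr List.mem_cons_self
          have hcon : PySem.Set.contains tr k = true := by
            simpa using (PySem.Set.contains_iff tr k).2 hktr
          rw [hcon]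
          simp only [if_true]
          have hstep : stepB2 p0 (m : Int) drop (c, acc) (k, x) = (c, acc) := by
            simp only [stepB2]
            rw [if_neg (by rintro ⟨he, -⟩; exact h0 he)]
            rw [hdrop k le_rfl, e2]
            simp
          rw [hstep]
          apply ih (k + 1) (a - 1) r c acc hc
          · intro j hj
            rw [htr j (by omega), e1, e2]
            have hne : j ≠ k := by omega
            simp [hne]
          · intro j hj
            rw [hdrop j (by omega), e2]
            rcases eq_or_ne j k with hjk | hjk
            · omega
            · simp [hjk]
        · have e2 : spos p0 p1 a k (x :: t) = spos p0 p1 a (k + 1) t := by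
            simp only [spos]; rw [if_neg h0, if_pos h1, if_neg ha]
          have hks : k ∉ spos p0 p1 a (k + 1) t := fun hm => by
            have := mem_spos_lb p0 p1 t a (k + 1) k hm; omega
          have hktr : k ∉ tr := by
            rw [htr k le_rfl, e1, e2]
            rintro (hm | hm)
            · exact hkf hm
            · exact hks hm
          have hcon : PySem.Set.contains tr k = false := by
            rw [← Bool.not_eq_true, PySem.Set.contains_iff]
            exact hktr
          rw [hcon]
          simp only [Bool.false_eq_true, if_false]
          have hstep : stepB2 p0 (m : Int) drop (c, acc) (k, x) = (c, acc ++ [x]) := by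
            simp only [stepB2]
            rw [if_neg (by rintro ⟨he, -⟩; exact h0 he)]
            rw [hdrop k le_rfl, e2]
            simp [hks]
          rw [hstep]
          apply ih (k + 1) a r c (acc ++ [x]) hc
          · intro j hj
            rw [htr j (by omega), e1, e2]
          · intro j hj
            rw [hdrop j (by omega), e2]
      · have e2 : spos p0 p1 a k (x :: t) = spos p0 p1 a (k + 1) t := by
          simp only [spos]; rw [if_neg h0, if_neg h1]
        have hks : k ∉ spos p0 p1 a (k + 1) t := fun hm => by
          have := mem_spos_lb p0 p1 t a (k + 1) k hm; omega
        have hktr : k ∉ tr := by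
          rw [htr k le_rfl, e1, e2]
          rintro (hm | hm)
          · exact hkf hm
          · exact hks hm
        have hcon : PySem.Set.contains tr k = false := by
          rw [← Bool.not_eq_true, PySem.Set.contains_iff]
          exact hktr
        rw [hcon]
        simp only [Bool.false_eq_true, if_false]
        have hstep : stepB2 p0 (m : Int) drop (c, acc) (k, x) = (c, acc ++ [x]) := by
          simp only [stepB2]
          rw [if_neg (by rintro ⟨he, -⟩; exact h0 he)]
          rw [hdrop k le_rfl, e2]
          simp [hks]
        rw [hstep]
        apply ih (k + 1) a r c (acc ++ [x]) hc
        · intro j hj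
          rw [htr j (by omega), e1, e2]
        · intro j hj
          rw [hdrop j (by omega), e2]

lemma pyGetD_map_inrange (f : Int → Int) (xs : List Int) (i : Int) (d d' : Int)
    (h0 : 0 ≤ i) (h : i < (xs.length : Int)) :
    PySem.List.pyGetD (xs.map f) i d' = f (PySem.List.pyGetD xs i d) := by
  rw [PySem.List.pyGetD_of_nonneg _ _ h0, PySem.List.pyGetD_of_nonneg _ _ h0]
  have hlt : i.toNat < xs.length := by omega
  simp [List.getD_eq_getElem?_getD, hlt]

lemma pyGetD_replicate_false (n : Nat) (j : Int) (hj : 0 ≤ j) :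
    PySem.List.pyGetD (List.replicate n false) j false = false := by
  rw [PySem.List.pyGetD_of_nonneg _ _ hj]
  rcases Nat.lt_or_ge j.toNat n with h | h
  · simp [List.getD_eq_getElem?_getD, h]
  · simp [List.getD_eq_getElem?_getD, Nat.not_lt.2 h]

lemma convA1 (p0 p1 : Int) (trace : List Int) :
    (PySem.List.pyRange 0 (PySem.List.len trace) 1).foldl
      (fun (st : List Int × PySem.Set Int) i =>
        if PySem.List.pyGetD (trace.map (fun x => if x = p0 then (1 : Int) else if x = p1 then 2 else -1)) i 0 = 1 then (st.1 ++ [i], st.2)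
        else if PySem.List.pyGetD (trace.map (fun x => if x = p0 then (1 : Int) else if x = p1 then 2 else -1)) i 0 = 2 ∧ st.1 ≠ [] then
          (if st.1.headD 0 < i then (st.1.tail, PySem.Set.add (PySem.Set.add st.2 (st.1.headD 0)) i)
           else st)
        else st)
      ([], PySem.Set.empty)
    = (PySem.List.enumerate trace 0).foldl (stepA p0 p1) ([], PySem.Set.empty) := by
  rw [PySem.List.enumerate_eq_map_pyRange trace 0]
  rw [List.foldl_map]
  apply PySem.List.foldl_congr_mem
  intro acc i hi
  rw [PySem.List.mem_pyRange_one, PySem.List.len_eq] at hi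
  rw [pyGetD_map_inrange _ trace i 0 0 hi.1 hi.2]
  by_cases hx0 : PySem.List.pyGetD trace i 0 = p0 <;>
    by_cases hx1 : PySem.List.pyGetD trace i 0 = p1 <;>
      by_cases hn : acc.1 = [] <;>
        simp [stepA, hx0, hx1, hn] <;>
          (try (by_cases hpp : p1 = p0 <;> simp [hpp]))

lemma convA2 (trace : List Int) (tr : PySem.Set Int) :
    (PySem.List.pyRange 0 (PySem.List.len trace) 1).foldl
      (fun acc i => if PySem.Set.contains tr i then acc else acc ++ [PySem.List.pyGetD trace i 0]) []
    = (PySem.List.enumerate trace 0).foldl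
      (fun acc (px : Int × Int) => if PySem.Set.contains tr px.1 then acc else acc ++ [px.2]) [] := by
  rw [PySem.List.enumerate_eq_map_pyRange trace 0, List.foldl_map]

lemma convB1 (p0 p1 : Int) (trace : List Int) :
    (PySem.List.pyRange 0 (PySem.List.len trace) 1).foldl
      (fun (st : Int × Int × List Bool) i =>
        if PySem.List.pyGetD trace i 0 = p0 then (st.1 + 1, st.2.1, st.2.2)
        else if PySem.List.pyGetD trace i 0 = p1 then
          (if st.1 > 0 then (st.1 - 1, st.2.1 + 1, PySem.List.pySetD st.2.2 i true) else st)
        else st)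
      (0, 0, List.replicate trace.length false)
    = (PySem.List.enumerate trace 0).foldl (stepB1 p0 p1) (0, 0, List.replicate trace.length false) := by
  rw [PySem.List.enumerate_eq_map_pyRange trace 0, List.foldl_map]
  rfl

lemma convB2 (p0 mI : Int) (drop : List Bool) (trace : List Int) :
    (PySem.List.pyRange 0 (PySem.List.len trace) 1).foldl
      (fun (st : Int × List Int) i =>
        if PySem.List.pyGetD trace i 0 = p0 ∧ st.1 < mI then (st.1 + 1, st.2)
        else if PySem.List.pyGetD drop i false then st
        else (st.1, st.2 ++ [PySem.List.pyGetD trace i 0]))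
      (0, [])
    = (PySem.List.enumerate trace 0).foldl (stepB2 p0 mI drop) (0, []) := by
  rw [PySem.List.enumerate_eq_map_pyRange trace 0, List.foldl_map]
  rfl

theorem remove_binary_pattern_core (pair trace : List Int) :
    remove_binary_pattern pair trace = remove_binary_pattern_alt pair trace := by
  simp only [remove_binary_pattern, remove_binary_pattern_alt]
  generalize (PySem.List.pyGet? pair 0).getD 0 = p0
  generalize (PySem.List.pyGet? pair 1).getD 0 = p1
  rw [convA1 p0 p1 trace, convA2, convB1 p0 p1 trace, convB2]
  obtain ⟨hA1, hA2⟩ := loopA p0 p1 trace 0 [] PySem.Set.empty (by simp)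
  obtain ⟨hB1, hB2⟩ := loopB1 p0 p1 trace 0 0 0 (List.replicate trace.length false) le_rfl (by simp)
  rw [hB1, zero_add]
  apply outEq p0 p1 (spos p0 p1 0 0 trace).length _ _ trace 0 0 0 0 []
  · exact (min_eq_right (by positivity)).symm
  · intro j hj
    rw [hA2 j]
    simp [PySem.Set.empty]
  · intro j hj
    rw [hB2 j hj, pyGetD_replicate_false trace.length j hj]
    simp

-- ===== VERDICT (by name: the statement is the Claim_ definition above) =====
theorem remove_binary_pattern_spec : Claim_equal_remove_binary_pattern := by
  intro pair trace _ _
  unfold Spec_remove_binary_pattern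
  exact remove_binary_pattern_core pair trace
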